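-- pv_equiv track=rewrite | github.com/MaxHuwald/Master-s-thesis | Python_scripts/Trimmer.py | trim_polyA
-- ===== SOURCE A (Python) =====
-- def trim_polyA(seq, qual, max_wiggle=2):
--     wiggle_count = 0
--     trim_pos = len(seq)
--     for i in range(len(seq) - 1, -1, -1):
--         if seq[i] == 'A':
--             wiggle_count = 0
--             trim_pos = i
--         else:
--             wiggle_count += 1
--             if wiggle_count > max_wiggle:
--                 break
--     return seq[:trim_pos], qual[:trim_pos]
-- ===== SOURCE B (Python) =====
-- def trim_polyA(seq, qual, max_wiggle=2):
--     # Forward single pass: track the earliest 'A' that starts a run reaching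
--     # the end with every non-A gap of length <= max_wiggle.
--     cand = None
--     run = 0
--     for i, c in enumerate(seq):
--         if c == 'A':
--             run = 0
--             if cand is None:
--                 cand = i
--         else:
--             run += 1
--             if run > max_wiggle:
--                 cand = None
--     trim = len(seq) if cand is None else cand
--     return seq[:trim], qual[:trim]
-- ===== Notes on version B (the rewrite author's own statement) =====
-- stated objective: alternative
-- what changed: Replaces the backward stateful scan with early break by a single forward pass over enumerate(seq) tracking the earliest candidate 'A' and the current non-A run length.
import Mathlib
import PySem

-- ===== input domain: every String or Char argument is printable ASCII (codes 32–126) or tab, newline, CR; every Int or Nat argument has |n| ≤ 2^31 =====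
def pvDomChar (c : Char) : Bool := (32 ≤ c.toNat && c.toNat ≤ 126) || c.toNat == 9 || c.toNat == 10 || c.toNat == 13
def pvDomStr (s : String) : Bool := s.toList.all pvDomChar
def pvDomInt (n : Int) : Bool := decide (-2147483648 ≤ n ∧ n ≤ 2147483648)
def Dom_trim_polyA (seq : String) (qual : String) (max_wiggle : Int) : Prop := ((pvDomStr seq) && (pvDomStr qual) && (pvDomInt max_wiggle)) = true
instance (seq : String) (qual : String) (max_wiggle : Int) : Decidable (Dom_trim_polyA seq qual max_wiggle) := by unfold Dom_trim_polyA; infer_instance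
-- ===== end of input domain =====

-- B replaces A's backward scan (with early break) by one forward pass tracking the earliest
-- candidate 'A' and the current non-A run length; alternative decomposition, same cost.


-- ===== PORT A =====
-- the loop 'for i in range(len(seq)-1, -1, -1)' with state (wiggle_count, trim_pos) and break;
-- fuel k+1 processes index k (always in range, so getD's default is never read)
def trimAGo (cs : List Char) (mw : Int) : Nat → Int → Int → Int
  | 0, _, trim => trim
  | k + 1, w, trim =>
    if cs.getD k ' ' = 'A' then trimAGo cs mw k 0 (k : Int)
    else if w + 1 > mw then trim
    else trimAGo cs mw k (w + 1) trim

def trimAPos (seq : String) (mw : Int) : Int :=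
  trimAGo seq.toList mw seq.toList.length 0 (seq.toList.length : Int)

def trim_polyA (seq : String) (qual : String) (max_wiggle : Int) : String × String :=
  (PySem.Str.slice seq none (some (trimAPos seq max_wiggle)),
   PySem.Str.slice qual none (some (trimAPos seq max_wiggle)))

-- ===== PORT B =====
-- one forward step of Source B's loop body on state (cand, run) and element (i, c)
def trimStep (mw : Int) (st : Option Int × Int) (p : Int × Char) : Option Int × Int :=
  if p.2 = 'A' then
    (match st.1 with | none => some p.1 | some j => some j, 0)
  else
    let run := st.2 + 1
    (if run > mw then none else st.1, run)

def trimBPos (seq : String) (mw : Int) : Int :=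
  match ((PySem.List.enumerate seq.toList 0).foldl (trimStep mw) (none, 0)).1 with
  | none => (seq.toList.length : Int)
  | some i => i

def trim_polyA_alt (seq : String) (qual : String) (max_wiggle : Int) : String × String :=
  (PySem.Str.slice seq none (some (trimBPos seq max_wiggle)),
   PySem.Str.slice qual none (some (trimBPos seq max_wiggle)))

-- ===== PRECONDITION & SPEC =====
def Spec_trim_polyA (seq : String) (qual : String) (max_wiggle : Int) (out : String × String) : Prop := out = trim_polyA_alt seq qual max_wiggle
instance (seq : String) (qual : String) (max_wiggle : Int) (out : String × String) : Decidable (Spec_trim_polyA seq qual max_wiggle out) := by unfold Spec_trim_polyA; infer_instance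

-- ===== CLAIM (what is proved, stated in full; the proofs are below) =====
def Claim_equal_trim_polyA : Prop := ∀ (seq : String) (qual : String) (max_wiggle : Int), Dom_trim_polyA seq qual max_wiggle → Spec_trim_polyA seq qual max_wiggle (trim_polyA seq qual max_wiggle)

-- ===== LEMMAS AND PROOFS =====

-- shared semantics: backward scan of a REVERSED list, carrying (wiggle, trim);
-- at an 'A' the trim position is the length of the remaining (reversed) tail
def pvR (mw : Int) : List Char → Int → Int → Int
  | [], _, t => t
  | c :: rest, w, t =>
    if c = 'A' then pvR mw rest 0 (rest.length : Int)
    else if w + 1 > mw then t else pvR mw rest (w + 1) t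

lemma trimAGo_eq_pvR (cs : List Char) (mw : Int) :
    ∀ k, k ≤ cs.length → ∀ w t, trimAGo cs mw k w t = pvR mw ((cs.take k).reverse) w t := by
  intro k
  induction k with
  | zero => intro _ w t; simp [trimAGo, pvR]
  | succ k ih =>
    intro hk w t
    have hk' : k < cs.length := hk
    have htake : cs.take (k + 1) = cs.take k ++ [cs[k]] := by
      rw [List.take_add_one, List.getElem?_eq_getElem hk']
      rfl
    have hlen : ((cs.take k).reverse.length : Int) = (k : Int) := by
      simp [List.length_take, Nat.min_eq_left (Nat.le_of_lt hk')]
    rw [htake, List.reverse_append]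
    simp only [List.reverse_singleton, List.singleton_append]
    show trimAGo cs mw (k + 1) w t = pvR mw (cs[k] :: (cs.take k).reverse) w t
    simp only [trimAGo, pvR, List.getD_eq_getElem?_getD, List.getElem?_eq_getElem hk',
      Option.getD_some, hlen]
    split_ifs with h1 h2
    · exact ih (Nat.le_of_lt hk') 0 (k : Int)
    · rfl
    · exact ih (Nat.le_of_lt hk') (w + 1) t

-- forward-scan invariant: the fold state (cand, run) of Source B after a prefix determines
-- pvR of the reversed prefix for every admissible incoming (w, t)
lemma fold_inv (mw : Int) (cs : List Char) :
    0 ≤ ((PySem.List.enumerate cs 0).foldl (trimStep mw) (none, 0)).2 ∧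
    (1 ≤ ((PySem.List.enumerate cs 0).foldl (trimStep mw) (none, 0)).2 ∧
      mw < ((PySem.List.enumerate cs 0).foldl (trimStep mw) (none, 0)).2 →
      ((PySem.List.enumerate cs 0).foldl (trimStep mw) (none, 0)).1 = none) ∧
    ∀ w t : Int, 0 ≤ w → (w = 0 ∨ w ≤ mw) →
      pvR mw cs.reverse w t =
        if 1 ≤ ((PySem.List.enumerate cs 0).foldl (trimStep mw) (none, 0)).2 ∧
            mw < w + ((PySem.List.enumerate cs 0).foldl (trimStep mw) (none, 0)).2
        then t
        else ((PySem.List.enumerate cs 0).foldl (trimStep mw) (none, 0)).1.getD t := by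
  induction cs using List.reverseRecOn with
  | nil => refine ⟨le_refl 0, by simp, ?_⟩
           intro w t _ _
           simp [pvR, PySem.List.enumerate]
  | append_singleton ds c ih =>
    obtain ⟨hrun, hnone, hR⟩ := ih
    have henum : PySem.List.enumerate (ds ++ [c]) 0 =
        PySem.List.enumerate ds 0 ++ [((ds.length : Int), c)] := by
      rw [PySem.List.enumerate_append]
      simp [PySem.List.enumerate_cons, PySem.List.enumerate_nil]
    set st := (PySem.List.enumerate ds 0).foldl (trimStep mw) (none, 0) with hst
    have hfold : (PySem.List.enumerate (ds ++ [c]) 0).foldl (trimStep mw) (none, 0) =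
        trimStep mw st ((ds.length : Int), c) := by
      rw [henum, List.foldl_append]
      simp only [List.foldl_cons, List.foldl_nil]
      rw [hst]
    rw [hfold]
    by_cases hc : c = 'A'
    · -- A-branch: new state = (cand <|> some |ds|, 0)
      have hstateA : trimStep mw st ((ds.length : Int), c) =
          ((match st.1 with | none => some (ds.length : Int) | some j => some j), 0) := by
        simp [trimStep, hc]
      rw [hstateA]
      refine ⟨le_refl 0, fun h => absurd h.1 (by omega), ?_⟩
      intro w t hw _
      have hstep : pvR mw (ds ++ [c]).reverse w t = pvR mw ds.reverse 0 (ds.length : Int) := by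
        rw [List.reverse_append]
        simp [pvR, hc]
      rw [hstep, hR 0 (ds.length : Int) (le_refl 0) (Or.inl rfl)]
      dsimp only
      rw [if_neg (fun h : (1 : Int) ≤ 0 ∧ mw < w + 0 => absurd h.1 (by omega))]
      cases h : st.1 with
      | none =>
        simp only [Option.getD_some]
        split_ifs <;> rfl
      | some j =>
        have hcond : ¬ (1 ≤ st.2 ∧ mw < 0 + st.2) := by
          intro hcond
          have hn := hnone ⟨hcond.1, by omega⟩
          rw [h] at hn
          simp at hn
        rw [if_neg hcond]
        simp
    · -- non-A branch: new state = (if run+1 > mw then none else cand, run+1)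
      have hstate : trimStep mw st ((ds.length : Int), c) =
          (if st.2 + 1 > mw then none else st.1, st.2 + 1) := by
        simp [trimStep, hc]
      rw [hstate]
      refine ⟨by dsimp only; omega, ?_, ?_⟩
      · intro hcond
        dsimp only at hcond ⊢
        have h1 : st.2 + 1 > mw := by omega
        simp [h1]
      · intro w t hw hwm
        have hstep : pvR mw (ds ++ [c]).reverse w t =
            if w + 1 > mw then t else pvR mw ds.reverse (w + 1) t := by
          rw [List.reverse_append]
          simp [pvR, hc]
        rw [hstep]
        dsimp only
        by_cases hb : w + 1 > mw
        · rw [if_pos hb, if_pos ⟨by omega, by omega⟩]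
        · rw [if_neg hb, hR (w + 1) t (by omega) (Or.inr (by omega))]
          by_cases h2 : mw < w + (st.2 + 1)
          · have hs1 : 1 ≤ st.2 := by omega
            rw [if_pos ⟨hs1, by omega⟩, if_pos ⟨by omega, h2⟩]
          · have hle : ¬ (st.2 + 1 > mw) := by omega
            rw [if_neg (by omega), if_neg (by omega), if_neg hle]

lemma trim_eq (cs : List Char) (mw : Int) :
    trimAGo cs mw cs.length 0 (cs.length : Int) =
      (match ((PySem.List.enumerate cs 0).foldl (trimStep mw) (none, 0)).1 with
        | none => (cs.length : Int) | some i => i) := by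
  obtain ⟨hrun, hnone, hR⟩ := fold_inv mw cs
  rw [trimAGo_eq_pvR cs mw cs.length (le_refl _) 0 (cs.length : Int), List.take_length,
    hR 0 (cs.length : Int) (le_refl 0) (Or.inl rfl)]
  split_ifs with h
  · rw [hnone ⟨h.1, by omega⟩]
  · cases h' : ((PySem.List.enumerate cs 0).foldl (trimStep mw) (none, 0)).1 with
    | none => simp
    | some j => simp

-- ===== VERDICT (by name: the statement is the Claim_ definition above) =====
theorem trim_polyA_spec : Claim_equal_trim_polyA := by
  intro seq qual mw _
  show trim_polyA seq qual mw = trim_polyA_alt seq qual mw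
  have hpos : trimAPos seq mw = trimBPos seq mw := by
    unfold trimAPos trimBPos
    rw [trim_eq seq.toList mw]
  unfold trim_polyA trim_polyA_alt
  rw [hpos]
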